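-- pv_equiv track=rewrite | github.com/guillainbisimwa/competitive-programming | C_Again_Good_Segment.py | find_non_mod_subarrays
-- ===== SOURCE A (Python) =====
-- def find_non_mod_subarrays(n, k, x):
--
--   ans = n * (n + 1) // 2
--   j = 0
--   cnt = {}
--
--   for i in range(n):
--     while j < n and cnt.get(x[j], 0) + 1 < k:
--       cnt[x[j]] = cnt.get(x[j], 0) + 1
--       j += 1
--
--     ans -= j - i
--
--     cnt[x[i]] = cnt.get(x[i], 0) - 1
--
--   return ans
-- ===== SOURCE B (Python) =====
-- def find_non_mod_subarrays(n, k, x):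
--   total = n * (n + 1) // 2
--   if k <= 0:
--     return total
--   occ = {}
--   bad = 0
--   lo = 0
--   for r in range(n):
--     ps = occ.setdefault(x[r], [])
--     ps.append(r)
--     if len(ps) >= k:
--       lo = max(lo, ps[-k] + 1)
--     bad += r - lo + 1
--   return total - bad
-- ===== Notes on version B (the rewrite author's own statement) =====
-- stated objective: alternative
-- what changed: Replaces A's sliding window over a frequency counter (expand j while no count would reach k, decrement counts as i leaves) by an occurrence-index method with no counter and no inner while loop: a dict maps each value to the list of its positions so far; at each right endpoint r the left bound is updated to max(lo, occ[x[r]][-k]+1) (one past the k-th most recent occurrence of x[r]), bad += r-lo+1, and the answer is n*(n+1)//2 - bad.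
-- intended difference: For k <= 0 with n >= 2 (every nonempty subarray trivially contains an element occurring >= k times, so the intended answer is all n*(n+1)//2 subarrays, which B returns), A's leftover negative counts make its while-condition fire spuriously and it returns a larger, meaningless value (e.g. A(2,0,[0,0]) = 4 > 3 subarrays); B's value is the intended count. — e.g. on find_non_mod_subarrays(2, 0, [0, 0]): A returns 4, B returns 3
import Mathlib
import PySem

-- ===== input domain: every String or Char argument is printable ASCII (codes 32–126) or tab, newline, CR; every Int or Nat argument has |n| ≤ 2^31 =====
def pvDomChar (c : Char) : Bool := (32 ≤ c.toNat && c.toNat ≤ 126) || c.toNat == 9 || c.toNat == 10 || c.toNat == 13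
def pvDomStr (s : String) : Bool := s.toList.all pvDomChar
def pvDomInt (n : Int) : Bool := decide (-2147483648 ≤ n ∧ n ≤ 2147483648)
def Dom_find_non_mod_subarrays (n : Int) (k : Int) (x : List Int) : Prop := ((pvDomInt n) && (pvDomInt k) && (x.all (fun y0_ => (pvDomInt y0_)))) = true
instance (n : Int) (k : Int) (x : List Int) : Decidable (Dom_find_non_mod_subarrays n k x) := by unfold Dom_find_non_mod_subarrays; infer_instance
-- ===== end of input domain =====

-- B replaces A's sliding window over a frequency counter by an occurrence-index method:
-- a dict of per-value position lists and a running max of (k-th most recent occurrence + 1),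
-- with no counter and no inner while loop (objective: alternative); for k ≤ 0, n ≥ 2 B
-- returns the intended total count where A's leftover negative counts give a larger value.

-- ===== PORT A =====
-- inner `while j < n and cnt.get(x[j], 0) + 1 < k` loop of A
-- (x[j] ported as pyGetD: exact inside Pre_, where 0 ≤ j < n ≤ len x)
def pvAWhile (x : List Int) (k : Int) (n : Int) :
    Nat → Int → PySem.Dict Int Int → Int × PySem.Dict Int Int
  | 0, j, cnt => (j, cnt)
  | fuel + 1, j, cnt =>
    if j < n ∧ cnt.getD (PySem.List.pyGetD x j 0) 0 + 1 < k then
      pvAWhile x k n fuel (j + 1)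
        (cnt.insert (PySem.List.pyGetD x j 0) (cnt.getD (PySem.List.pyGetD x j 0) 0 + 1))
    else (j, cnt)

-- body of A's `for i in range(n)` loop, on state (ans, j, cnt)
def pvStepA (x : List Int) (k : Int) (n : Int)
    (s : Int × Int × PySem.Dict Int Int) (i : Int) : Int × Int × PySem.Dict Int Int :=
  let p := pvAWhile x k n (n - s.2.1).toNat s.2.1 s.2.2
  let xi := PySem.List.pyGetD x i 0
  (s.1 - (p.1 - i), p.1, p.2.insert xi (p.2.getD xi 0 - 1))

def find_non_mod_subarrays (n : Int) (k : Int) (x : List Int) : Int :=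
  let ans := PySem.Int.floordiv (n * (n + 1)) 2
  let s := (PySem.List.pyRange 0 n 1).foldl (pvStepA x k n) (ans, 0, PySem.Dict.empty)
  s.1

-- ===== PORT B =====
-- body of B's `for r in range(n)` loop, on state (bad, lo, occ); occ maps a value to the
-- list of its positions so far (occ.setdefault(x[r],[]).append(r) ported as getD [] ++ [r]
-- reinserted), and ps[-k] is ported as pyGetD ps (-k) 0 (exact: the branch has len(ps) ≥ k ≥ 1)
def pvStepB (x : List Int) (k : Int)
    (s : Int × Int × PySem.Dict Int (List Int)) (r : Int) :
    Int × Int × PySem.Dict Int (List Int) :=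
  let xr := PySem.List.pyGetD x r 0
  let ps := s.2.2.getD xr [] ++ [r]
  let occ' := s.2.2.insert xr ps
  let lo' := if k ≤ (ps.length : Int) then max s.2.1 (PySem.List.pyGetD ps (-k) 0 + 1) else s.2.1
  (s.1 + (r - lo' + 1), lo', occ')

def find_non_mod_subarrays_alt (n : Int) (k : Int) (x : List Int) : Int :=
  let total := PySem.Int.floordiv (n * (n + 1)) 2
  if k ≤ 0 then total
  else
    let s := (PySem.List.pyRange 0 n 1).foldl (pvStepB x k) (0, 0, PySem.Dict.empty)
    total - s.1

-- ===== PRECONDITION & SPEC =====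
-- Pre_: A indexes x[i] for every i in range(n), so it raises IndexError iff n > len(x).
def Pre_find_non_mod_subarrays (n : Int) (k : Int) (x : List Int) : Prop :=
  n ≤ (x.length : Int)
instance (n : Int) (k : Int) (x : List Int) : Decidable (Pre_find_non_mod_subarrays n k x) := by
  unfold Pre_find_non_mod_subarrays; infer_instance

def pvWitness_find_non_mod_subarrays : Int × Int × List Int := (3, 2, [1, 2, 1])

-- For k ≤ 0 with n ≥ 2 (every nonempty subarray trivially contains an element occurring
-- ≥ k times, so the answer is all n*(n+1)//2 subarrays, which B returns), A's leftover
-- negative counts make its while-condition fire spuriously and it returns a larger,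
-- meaningless value; B's value is the intended count.
def D_find_non_mod_subarrays (n : Int) (k : Int) (x : List Int) : Prop :=
  2 ≤ n ∧ k ≤ 0
instance (n : Int) (k : Int) (x : List Int) : Decidable (D_find_non_mod_subarrays n k x) := by
  unfold D_find_non_mod_subarrays; infer_instance

def Spec_find_non_mod_subarrays (n : Int) (k : Int) (x : List Int) (out : Int) : Prop :=
  ¬ D_find_non_mod_subarrays n k x → out = find_non_mod_subarrays_alt n k x
instance (n : Int) (k : Int) (x : List Int) (out : Int) :
    Decidable (Spec_find_non_mod_subarrays n k x out) := by
  unfold Spec_find_non_mod_subarrays; infer_instance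

def pvDiffWitness_find_non_mod_subarrays : Int × Int × List Int := (2, 0, [0, 0])
def pvDiffWitnessOut_find_non_mod_subarrays : Int × Int := (4, 3)

-- ===== CLAIM (what is proved, stated in full; the proofs are below) =====
def Claim_unchanged_find_non_mod_subarrays : Prop := ∀ (n : Int) (k : Int) (x : List Int), Dom_find_non_mod_subarrays n k x → Pre_find_non_mod_subarrays n k x → Spec_find_non_mod_subarrays n k x (find_non_mod_subarrays n k x)
def Claim_changed_find_non_mod_subarrays : Prop := Dom_find_non_mod_subarrays (pvDiffWitness_find_non_mod_subarrays.1) (pvDiffWitness_find_non_mod_subarrays.2.1) (pvDiffWitness_find_non_mod_subarrays.2.2) ∧ Pre_find_non_mod_subarrays (pvDiffWitness_find_non_mod_subarrays.1) (pvDiffWitness_find_non_mod_subarrays.2.1) (pvDiffWitness_find_non_mod_subarrays.2.2) ∧ D_find_non_mod_subarrays (pvDiffWitness_find_non_mod_subarrays.1) (pvDiffWitness_find_non_mod_subarrays.2.1) (pvDiffWitness_find_non_mod_subarrays.2.2) ∧ find_non_mod_subarrays (pvDiffWitness_find_non_mod_subarrays.1) (pvDiffWitness_find_non_mod_subarrays.2.1)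 (pvDiffWitness_find_non_mod_subarrays.2.2) = pvDiffWitnessOut_find_non_mod_subarrays.1 ∧ find_non_mod_subarrays_alt (pvDiffWitness_find_non_mod_subarrays.1) (pvDiffWitness_find_non_mod_subarrays.2.1) (pvDiffWitness_find_non_mod_subarrays.2.2) = pvDiffWitnessOut_find_non_mod_subarrays.2 ∧ pvDiffWitnessOut_find_non_mod_subarrays.1 ≠ pvDiffWitnessOut_find_non_mod_subarrays.2
def Claim_exact_find_non_mod_subarrays : Prop := ∀ (n : Int) (k : Int) (x : List Int), Dom_find_non_mod_subarrays n k x → Pre_find_non_mod_subarrays n k x → D_find_non_mod_subarrays n k x → find_non_mod_subarrays n k x ≠ find_non_mod_subarrays_alt n k x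

-- ===== LEMMAS AND PROOFS =====

-- number of occurrences of v in the prefix x[:m], as an integer
def pvPfx (x : List Int) (m : Nat) (v : Int) : Int := ((x.take m).count v : Int)

-- the window x[a:b]
def pvWin (x : List Int) (a b : Nat) : List Int := (x.drop a).take (b - a)

-- "the subarray x[a:b] is bad": every element occurs fewer than k times in it
def pvBadB (x : List Int) (k : Int) (a b : Nat) : Bool :=
  (pvWin x a b).all (fun v => decide (((pvWin x a b).count v : Int) < k))

-- number of bad subarrays with left endpoint i (right endpoints m in range N)
def pvBadL (x : List Int) (k : Int) (N i : Nat) : Nat :=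
  (List.range N).countP (fun m => decide (i ≤ m) && pvBadB x k i (m + 1))

-- number of bad subarrays with right endpoint r
def pvBadR (x : List Int) (k : Int) (r : Nat) : Nat :=
  (List.range (r + 1)).countP (fun l => pvBadB x k l (r + 1))

-- the increasing list of positions p < r with x[p] = v (B's occ[v] after r steps)
def pvOccs (x : List Int) (r : Nat) (v : Int) : List Int :=
  ((List.range r).filter (fun p => decide (x.getD p 0 = v))).map (fun p : Nat => (p : Int))

-- [0, 1, ..., i-1] as integers (the index list both loops run over)
def pvIR (i : Nat) : List Int := List.map (fun m : Nat => (m : Int)) (List.range i)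

theorem pvIR_succ (i : Nat) : pvIR (i + 1) = pvIR i ++ [(i : Int)] := by
  rw [pvIR, List.range_succ, List.map_append]; rfl

theorem pvIR_pyRange (n : Int) : PySem.List.pyRange 0 n 1 = pvIR n.toNat := by
  rw [PySem.List.pyRange_one, pvIR]
  simp

theorem pvPfx_zero (x : List Int) (v : Int) : pvPfx x 0 v = 0 := by simp [pvPfx]

theorem pvPfx_nonneg (x : List Int) (m : Nat) (v : Int) : 0 ≤ pvPfx x m v := by
  unfold pvPfx
  exact_mod_cast Nat.zero_le _

theorem pvPfx_succ (x : List Int) {m : Nat} (h : m < x.length) (v : Int) :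
    pvPfx x (m + 1) v = pvPfx x m v + (if x.getD m 0 = v then 1 else 0) := by
  unfold pvPfx
  have ht : x.take (m + 1) = x.take m ++ [x[m]] := by
    rw [List.take_add_one, List.getElem?_eq_getElem h]
    rfl
  rw [ht, List.count_append, List.getD_eq_getElem x 0 h]
  by_cases hv : x[m] = v
  · subst hv
    rw [if_pos rfl]
    push_cast [List.count_cons, List.count_nil]
    simp
  · rw [if_neg hv]
    have : List.count v [x[m]] = 0 := by
      simp [List.count_cons, List.count_nil]
      intro hh; exact hv hh
    rw [this]
    push_cast; ring

theorem pvPfx_mono (x : List Int) {a b : Nat} (h : a ≤ b) (v : Int) :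
    pvPfx x a v ≤ pvPfx x b v := by
  unfold pvPfx
  have h1 : x.take a = (x.take b).take a := by rw [List.take_take, Nat.min_eq_left h]
  rw [h1]
  exact_mod_cast (List.take_sublist a (x.take b)).count_le (a := v)

theorem pvWin_count (x : List Int) {a b : Nat} (hab : a ≤ b) (v : Int) :
    ((pvWin x a b).count v : Int) = pvPfx x b v - pvPfx x a v := by
  have h : x.take b = x.take a ++ pvWin x a b := by
    conv_lhs => rw [show b = a + (b - a) by omega]
    rw [List.take_add]
    rfl
  unfold pvPfx
  rw [h, List.count_append]
  push_cast; ring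

theorem mem_pvWin (x : List Int) {a b p : Nat} (hap : a ≤ p) (hpb : p < b)
    (hpl : p < x.length) : x.getD p 0 ∈ pvWin x a b := by
  have hab : a ≤ b := le_of_lt (lt_of_le_of_lt hap hpb)
  have h1 : ((pvWin x a b).count (x.getD p 0) : Int) ≥ 1 := by
    rw [pvWin_count x hab]
    have hs := pvPfx_succ x hpl (x.getD p 0)
    rw [if_pos rfl] at hs
    have m1 : pvPfx x (p + 1) (x.getD p 0) ≤ pvPfx x b (x.getD p 0) := pvPfx_mono x (by omega) _
    have m2 : pvPfx x a (x.getD p 0) ≤ pvPfx x p (x.getD p 0) := pvPfx_mono x hap _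
    omega
  have h2 : 0 < (pvWin x a b).count (x.getD p 0) := by exact_mod_cast h1
  exact List.count_pos_iff.mp h2

theorem pvBadB_eq_true_of (x : List Int) (k : Int) {a b : Nat} (hab : a ≤ b)
    (h : ∀ v, pvPfx x b v - pvPfx x a v < k) : pvBadB x k a b = true := by
  unfold pvBadB
  rw [List.all_eq_true]
  intro v _
  rw [decide_eq_true_iff, pvWin_count x hab]
  exact h v

theorem pvBadB_eq_false_of (x : List Int) (k : Int) {a b p : Nat} (hap : a ≤ p)
    (hpb : p < b) (hpl : p < x.length)
    (h : k ≤ pvPfx x b (x.getD p 0) - pvPfx x a (x.getD p 0)) : pvBadB x k a b = false := by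
  unfold pvBadB
  rw [List.all_eq_false]
  refine ⟨x.getD p 0, mem_pvWin x hap hpb hpl, ?_⟩
  rw [decide_eq_true_iff, pvWin_count x (le_of_lt (lt_of_le_of_lt hap hpb))]
  omega

theorem pvBadB_count_lt (x : List Int) (k : Int) {a b : Nat} (hab : a ≤ b)
    (h : pvBadB x k a b = true) (v : Int) (hv : 1 ≤ pvPfx x b v - pvPfx x a v) :
    pvPfx x b v - pvPfx x a v < k := by
  unfold pvBadB at h
  rw [List.all_eq_true] at h
  have hmem : v ∈ pvWin x a b := by
    apply List.count_pos_iff.mp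
    have : (1 : Int) ≤ ((pvWin x a b).count v : Int) := by rw [pvWin_count x hab]; omega
    exact_mod_cast this
  have := h v hmem
  rw [decide_eq_true_iff, pvWin_count x hab] at this
  exact this

-- for k ≥ 1, badness of x[a:b] is exactly "every prefix-count difference is < k"
theorem pvBadB_iff_forall (x : List Int) (k : Int) {a b : Nat} (hk : 1 ≤ k) (hab : a ≤ b) :
    pvBadB x k a b = true ↔ ∀ v, pvPfx x b v - pvPfx x a v < k := by
  constructor
  · intro h v
    by_cases hv : 1 ≤ pvPfx x b v - pvPfx x a v
    · exact pvBadB_count_lt x k hab h v hv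
    · omega
  · exact pvBadB_eq_true_of x k hab

theorem pvCount_interval (i j : Nat) : ∀ N : Nat,
    (List.range N).countP (fun m => decide (i ≤ m) && decide (m < j)) = min j N - min i N := by
  intro N
  induction N with
  | zero => simp
  | succ N ih =>
    rw [List.range_succ, List.countP_append, ih]
    simp only [List.countP_cons, List.countP_nil]
    by_cases h1 : i ≤ N <;> by_cases h2 : N < j <;>
      simp [h1, h2] <;> omega

theorem pvSumRange (f : Nat → Nat) : ∀ N : Nat,
    ((List.range N).map f).sum = ∑ m ∈ Finset.range N, f m := by
  intro N
  induction N with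
  | zero => simp
  | succ N ih => rw [List.range_succ, Finset.sum_range_succ]; simp [ih]

theorem pvCountPSum (p : Nat → Bool) : ∀ M : Nat,
    (List.range M).countP p = ∑ m ∈ Finset.range M, (if p m then 1 else 0) := by
  intro M
  induction M with
  | zero => simp
  | succ M ih =>
    rw [List.range_succ, List.countP_append, Finset.sum_range_succ, ih]
    simp [List.countP_cons]

-- double counting: summing per left endpoint equals summing per right endpoint
theorem pvSwap (x : List Int) (k : Int) (N : Nat) :
    ((List.range N).map (pvBadL x k N)).sum = ((List.range N).map (pvBadR x k)).sum := by
  rw [pvSumRange, pvSumRange]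
  unfold pvBadL pvBadR
  have hL : ∀ i, (List.range N).countP (fun m => decide (i ≤ m) && pvBadB x k i (m + 1))
      = ∑ m ∈ Finset.range N, (if decide (i ≤ m) && pvBadB x k i (m + 1) then 1 else 0) :=
    fun i => pvCountPSum _ N
  have hR : ∀ r, (List.range (r + 1)).countP (fun l => pvBadB x k l (r + 1))
      = ∑ l ∈ Finset.range (r + 1), (if pvBadB x k l (r + 1) then 1 else 0) :=
    fun r => pvCountPSum _ (r + 1)
  simp only [hL, hR]
  rw [Finset.sum_comm]
  apply Finset.sum_congr rfl
  intro m hm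
  have hmN : m + 1 ≤ N := by
    have := Finset.mem_range.mp hm; omega
  have hsub : Finset.range (m + 1) ⊆ Finset.range N := by
    intro a ha; simp only [Finset.mem_range] at *; omega
  rw [← Finset.sum_subset hsub (fun i _ hni => by
    have him : ¬ i ≤ m := by simp only [Finset.mem_range] at hni; omega
    simp [him])]
  apply Finset.sum_congr rfl
  intro i hi
  have him : i ≤ m := by simp only [Finset.mem_range] at hi; omega
  simp [him]

-- ===== A-side =====

theorem pvAWhile_run (x : List Int) (k n : Int) (N : Nat) (hn : n = (N : Int))
    (hlen : N ≤ x.length) (hk : 1 ≤ k) (i : Nat) (hi : i ≤ N) :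
    ∀ (fuel : Nat) (j : Nat) (cnt : PySem.Dict Int Int), j ≤ N → N - j ≤ fuel →
    (∀ v, cnt.getD v 0 = pvPfx x j v - pvPfx x i v) →
    (∀ v, pvPfx x j v - pvPfx x i v < k) →
    ∃ (j' : Nat) (cnt' : PySem.Dict Int Int),
      pvAWhile x k n fuel (j : Int) cnt = ((j' : Int), cnt') ∧
      i ≤ j' ∧ j ≤ j' ∧ j' ≤ N ∧
      (∀ v, cnt'.getD v 0 = pvPfx x j' v - pvPfx x i v) ∧
      (∀ v, pvPfx x j' v - pvPfx x i v < k) ∧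
      (j' = N ∨ k ≤ pvPfx x j' (x.getD j' 0) - pvPfx x i (x.getD j' 0) + 1) := by
  intro fuel
  induction fuel with
  | zero =>
    intro j cnt hj hfuel hcnt hlt
    have hjN : j = N := by omega
    refine ⟨j, cnt, rfl, by omega, le_refl _, by omega, hcnt, hlt, Or.inl hjN⟩
  | succ fuel ih =>
    intro j cnt hj hfuel hcnt hlt
    by_cases hcond : ((j : Int) < n ∧ cnt.getD (PySem.List.pyGetD x (j : Int) 0) 0 + 1 < k)
    · -- loop body runs
      have hjN : j < N := by
        have := hcond.1; omega
      have hxj : PySem.List.pyGetD x (j : Int) 0 = x.getD j 0 := PySem.List.pyGetD_natCast x j 0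
      have hjl : j < x.length := lt_of_lt_of_le hjN hlen
      have hstep : pvAWhile x k n (fuel + 1) (j : Int) cnt =
          pvAWhile x k n fuel ((j : Int) + 1)
            (cnt.insert (PySem.List.pyGetD x (j : Int) 0)
              (cnt.getD (PySem.List.pyGetD x (j : Int) 0) 0 + 1)) := by
        rw [pvAWhile, if_pos hcond]
      have hcast : ((j : Int) + 1) = ((j + 1 : Nat) : Int) := by push_cast; ring
      have hcnt' : ∀ v, (cnt.insert (PySem.List.pyGetD x (j : Int) 0)
            (cnt.getD (PySem.List.pyGetD x (j : Int) 0) 0 + 1)).getD v 0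
          = pvPfx x (j + 1) v - pvPfx x i v := by
        intro v
        rw [hxj, PySem.Dict.getD_insert, pvPfx_succ x hjl v]
        by_cases hv : v = x.getD j 0
        · subst hv
          rw [if_pos rfl, if_pos rfl, hcnt]
          ring
        · rw [if_neg hv, if_neg (fun h => hv h.symm), hcnt]
          ring
      have hlt' : ∀ v, pvPfx x (j + 1) v - pvPfx x i v < k := by
        intro v
        rw [pvPfx_succ x hjl v]
        by_cases hv : x.getD j 0 = v
        · rw [if_pos hv]
          have h2 := hcond.2
          rw [hxj, hcnt] at h2
          rw [← hv]
          omega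
        · rw [if_neg hv]
          have := hlt v; omega
      obtain ⟨j', cnt', heq, hij', hjj', hj'N, hc1, hc2, hc3⟩ :=
        ih (j + 1) _ (by omega) (by omega) hcnt' hlt'
      rw [hcast] at hstep
      exact ⟨j', cnt', hstep.trans heq, hij', by omega, hj'N, hc1, hc2, hc3⟩
    · -- loop stops
      have hstop : pvAWhile x k n (fuel + 1) (j : Int) cnt = ((j : Int), cnt) := by
        rw [pvAWhile, if_neg hcond]
      have hij : i ≤ j := by
        by_contra hij
        push_neg at hij
        have hjl : j < x.length := by omega
        apply hcond
        constructor
        · omega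
        · rw [PySem.List.pyGetD_natCast x j 0, hcnt]
          have hs := pvPfx_succ x hjl (x.getD j 0)
          rw [if_pos rfl] at hs
          have := pvPfx_mono x (show j + 1 ≤ i by omega) (x.getD j 0)
          omega
      refine ⟨j, cnt, hstop, hij, le_refl _, hj, hcnt, hlt, ?_⟩
      by_cases hjN : j = N
      · exact Or.inl hjN
      · right
        have h2 : ¬ (cnt.getD (PySem.List.pyGetD x (j : Int) 0) 0 + 1 < k) := by
          intro h2
          exact hcond ⟨by omega, h2⟩
        rw [PySem.List.pyGetD_natCast x j 0, hcnt] at h2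
        omega

theorem pvBadL_eq (x : List Int) (k : Int) (N : Nat) (hlen : N ≤ x.length)
    {i j' : Nat} (hij : i ≤ j') (hj'N : j' ≤ N)
    (hlt : ∀ v, pvPfx x j' v - pvPfx x i v < k)
    (hstop : j' = N ∨ k ≤ pvPfx x j' (x.getD j' 0) - pvPfx x i (x.getD j' 0) + 1) :
    pvBadL x k N i = j' - i := by
  unfold pvBadL
  have hcong : ∀ m ∈ List.range N,
      (decide (i ≤ m) && pvBadB x k i (m + 1)) = (decide (i ≤ m) && decide (m < j')) := by
    intro m hm
    have hmN : m < N := List.mem_range.mp hm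
    by_cases him : i ≤ m
    · simp only [decide_eq_true him, Bool.true_and]
      by_cases hmj : m < j'
      · rw [decide_eq_true hmj]
        apply pvBadB_eq_true_of x k (by omega)
        intro v
        have h1 := pvPfx_mono x (show m + 1 ≤ j' by omega) v
        have h2 := hlt v
        omega
      · rw [decide_eq_false hmj]
        have hj'N' : j' < N := by omega
        rcases hstop with h | h
        · omega
        · apply pvBadB_eq_false_of x k hij (show j' < m + 1 by omega) (by omega)
          have hs := pvPfx_succ x (show j' < x.length by omega) (x.getD j' 0)
          rw [if_pos rfl] at hs
          have := pvPfx_mono x (show j' + 1 ≤ m + 1 by omega) (x.getD j' 0)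
          omega
    · simp [him]
  rw [List.countP_congr (fun m hm => by rw [hcong m hm]), pvCount_interval i j' N]
  omega

-- evaluating A's fold over range i, for k ≥ 1
theorem pvA_loop (x : List Int) (k n : Int) (N : Nat) (hn : n = (N : Int))
    (hlen : N ≤ x.length) (hk : 1 ≤ k) :
    ∀ i : Nat, i ≤ N →
    ∃ (j : Nat) (cnt : PySem.Dict Int Int),
      (pvIR i).foldl (pvStepA x k n)
          (PySem.Int.floordiv (n * (n + 1)) 2, 0, PySem.Dict.empty)
        = (PySem.Int.floordiv (n * (n + 1)) 2 - (((List.range i).map (pvBadL x k N)).sum : Int),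
           (j : Int), cnt) ∧
      j ≤ N ∧ (∀ v, cnt.getD v 0 = pvPfx x j v - pvPfx x i v) ∧
      (∀ v, pvPfx x j v - pvPfx x i v < k) := by
  intro i
  induction i with
  | zero =>
    intro _
    refine ⟨0, PySem.Dict.empty, ?_, by omega, ?_, ?_⟩
    · simp [pvIR]
    · intro v; simp [PySem.Dict.getD_empty, pvPfx_zero]
    · intro v; simp [pvPfx_zero]; omega
  | succ i ih =>
    intro hi1
    obtain ⟨j, cnt, heq, hjN, hcnt, hlt⟩ := ih (by omega)
    have hiN : i < N := by omega
    have hil : i < x.length := by omega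
    have hfuel : N - j ≤ ((n - (j : Int)).toNat) := by omega
    obtain ⟨j', cnt', hrun, hij', hjj', hj'N, hc1, hc2, hc3⟩ :=
      pvAWhile_run x k n N hn hlen hk i (by omega) ((n - (j : Int)).toNat) j cnt hjN hfuel hcnt hlt
    rw [pvIR_succ, List.foldl_append, heq]
    have hstep : pvStepA x k n
        (PySem.Int.floordiv (n * (n + 1)) 2 - (((List.range i).map (pvBadL x k N)).sum : Int),
         (j : Int), cnt) (i : Int)
        = (PySem.Int.floordiv (n * (n + 1)) 2
             - (((List.range i).map (pvBadL x k N)).sum : Int) - ((j' : Int) - (i : Int)),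
           (j' : Int), cnt'.insert (x.getD i 0) (cnt'.getD (x.getD i 0) 0 - 1)) := by
      simp only [pvStepA, hrun, PySem.List.pyGetD_natCast]
    simp only [List.foldl_cons, List.foldl_nil, hstep]
    refine ⟨j', cnt'.insert (x.getD i 0) (cnt'.getD (x.getD i 0) 0 - 1), ?_, hj'N, ?_, ?_⟩
    · have hbl : pvBadL x k N i = j' - i := pvBadL_eq x k N hlen hij' hj'N hc2 hc3
      have hbli : ((pvBadL x k N i : Nat) : Int) = (j' : Int) - (i : Int) := by
        rw [hbl, Nat.cast_sub hij']
      simp only [List.range_succ, List.map_append, List.sum_append, List.map_cons,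
        List.map_nil, List.sum_cons, List.sum_nil]
      rw [Prod.mk.injEq]
      refine ⟨?_, rfl⟩
      push_cast [hbli]
      ring
    · intro v
      rw [PySem.Dict.getD_insert, pvPfx_succ x hil v]
      by_cases hv : v = x.getD i 0
      · subst hv
        rw [if_pos rfl, if_pos rfl, hc1]
        ring
      · rw [if_neg hv, if_neg (fun h => hv h.symm), hc1]
        ring
    · intro v
      rw [pvPfx_succ x hil v]
      have := hc2 v
      have := pvPfx_mono x (show i ≤ i + 1 by omega) v
      split_ifs <;> omega

-- A and B for n ≤ 0 return the triangle number with no loop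
theorem pvA_trivial (x : List Int) (k n : Int) (h : n ≤ 0) :
    find_non_mod_subarrays n k x = PySem.Int.floordiv (n * (n + 1)) 2 := by
  unfold find_non_mod_subarrays
  rw [PySem.List.pyRange_one_eq_nil (by omega)]
  rfl

theorem pvB_trivial (x : List Int) (k n : Int) (h : n ≤ 0) :
    find_non_mod_subarrays_alt n k x = PySem.Int.floordiv (n * (n + 1)) 2 := by
  unfold find_non_mod_subarrays_alt
  rw [PySem.List.pyRange_one_eq_nil (by omega)]
  by_cases hk : k ≤ 0 <;> simp [hk]

theorem pvA_eval (x : List Int) (k n : Int) (hk : 1 ≤ k) (h0 : 0 ≤ n)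
    (hlen : n ≤ (x.length : Int)) :
    find_non_mod_subarrays n k x = PySem.Int.floordiv (n * (n + 1)) 2
      - (((List.range n.toNat).map (pvBadL x k n.toNat)).sum : Int) := by
  have hn : n = ((n.toNat : Nat) : Int) := by omega
  obtain ⟨j, cnt, heq, _, _, _⟩ :=
    pvA_loop x k n n.toNat hn (by omega) hk n.toNat (le_refl _)
  unfold find_non_mod_subarrays
  simp only [pvIR_pyRange, heq]

-- ===== B-side =====

theorem pvOccs_succ (x : List Int) (r : Nat) (v : Int) :
    pvOccs x (r + 1) v = if x.getD r 0 = v then pvOccs x r v ++ [(r : Int)] else pvOccs x r v := by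
  unfold pvOccs
  rw [List.range_succ, List.filter_append, List.filter_singleton]
  by_cases hv : x.getD r 0 = v
  · rw [if_pos hv]
    simp only [decide_eq_true hv, cond_true, List.map_append, List.map_cons, List.map_nil]
  · rw [if_neg hv]
    simp only [decide_eq_false hv, cond_false, List.map_append, List.map_nil, List.append_nil]

theorem pvOccs_mem (x : List Int) (r : Nat) (v : Int) {z : Int} (hz : z ∈ pvOccs x r v) :
    ∃ p : Nat, z = (p : Int) ∧ p < r ∧ x.getD p 0 = v := by
  unfold pvOccs at hz
  obtain ⟨p, hp, hpz⟩ := List.mem_map.mp hz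
  rw [List.mem_filter, List.mem_range, decide_eq_true_iff] at hp
  exact ⟨p, hpz.symm, hp.1, hp.2⟩

theorem pvOccs_sorted (x : List Int) (r : Nat) (v : Int) :
    (pvOccs x r v).Pairwise (· < ·) := by
  unfold pvOccs
  refine List.Pairwise.map _ (fun a b hab => by exact_mod_cast hab) ?_
  exact (List.pairwise_lt_range).filter _

-- count of occurrences ≥ l, via prefix counts
theorem pvOccs_countP (x : List Int) (v : Int) :
    ∀ (r : Nat), r ≤ x.length → ∀ (l : Nat), l ≤ r →
    (((pvOccs x r v).countP (fun z => decide ((l : Int) ≤ z)) : Nat) : Int)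
      = pvPfx x r v - pvPfx x l v := by
  intro r
  induction r with
  | zero =>
    intro _ l hl
    have : l = 0 := by omega
    subst this
    simp [pvOccs, pvPfx_zero]
  | succ r ih =>
    intro hr l hl
    rw [pvOccs_succ]
    have hrl : r < x.length := by omega
    by_cases hlr : l ≤ r
    · by_cases hv : x.getD r 0 = v
      · rw [if_pos hv, List.countP_append, pvPfx_succ x hrl v, if_pos hv]
        have hone : ([(r : Int)].countP (fun z => decide ((l : Int) ≤ z))) = 1 := by
          have : ((l : Int) ≤ (r : Int)) := by exact_mod_cast hlr
          simp [List.countP_cons, this]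
        rw [hone]
        push_cast
        rw [ih (by omega) l hlr]
        ring
      · rw [if_neg hv, pvPfx_succ x hrl v, if_neg hv, ih (by omega) l hlr]
        ring
    · have hlr1 : l = r + 1 := by omega
      subst hlr1
      have hzero : ∀ ps : List Int, (∀ z ∈ ps, ∃ p : Nat, z = (p : Int) ∧ p < r + 1) →
          ps.countP (fun z => decide (((r + 1 : Nat) : Int) ≤ z)) = 0 := by
        intro ps hps
        rw [List.countP_eq_zero]
        intro z hz
        obtain ⟨p, hpz, hp⟩ := hps z hz
        subst hpz
        simp only [decide_eq_true_iff]
        push_cast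
        omega
      by_cases hv : x.getD r 0 = v
      · rw [if_pos hv, hzero _ ?_]
        · simp
        · intro z hz
          rcases List.mem_append.mp hz with h | h
          · obtain ⟨p, h1, h2, _⟩ := pvOccs_mem x r v h
            exact ⟨p, h1, by omega⟩
          · rw [List.mem_singleton] at h
            exact ⟨r, h, by omega⟩
      · rw [if_neg hv, hzero _ ?_]
        · simp
        · intro z hz
          obtain ⟨p, h1, h2, _⟩ := pvOccs_mem x r v hz
          exact ⟨p, h1, by omega⟩

theorem pvOccs_len (x : List Int) (r : Nat) (hr : r ≤ x.length) (v : Int) :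
    (((pvOccs x r v).length : Nat) : Int) = pvPfx x r v := by
  have h := pvOccs_countP x v r hr 0 (by omega)
  have hall : (pvOccs x r v).countP (fun z => decide (((0 : Nat) : Int) ≤ z)) = (pvOccs x r v).length := by
    apply List.countP_eq_length.mpr
    intro z hz
    obtain ⟨p, h1, _, _⟩ := pvOccs_mem x r v hz
    subst h1
    simp
  rw [hall] at h
  rw [h, pvPfx_zero]
  push_cast
  ring

-- the element ps[-k] of ps = occ[x[r]] after appending r: one past it is the minimal
-- left bound that keeps the count of x[r] below k
theorem pvKth (x : List Int) (r : Nat) (hrl : r < x.length) (v : Int) (kn : Nat)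
    (hk1 : 1 ≤ kn) (hlen : kn ≤ (pvOccs x (r + 1) v).length) :
    ∃ q : Nat, PySem.List.pyGetD (pvOccs x (r + 1) v) (-(kn : Int)) 0 = (q : Int) ∧ q ≤ r ∧
      (∀ l : Nat, (pvPfx x (r + 1) v - pvPfx x l v < (kn : Int) ↔ q + 1 ≤ l)) := by
  set ps := pvOccs x (r + 1) v with hps
  have hm : ps.length - kn < ps.length := by omega
  have hget : PySem.List.pyGetD ps (-(kn : Int)) 0 = ps[ps.length - kn] :=
    PySem.List.pyGetD_neg_natCast ps kn 0 (by omega) hlen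
  obtain ⟨q, hqz, hqr, hqv⟩ := pvOccs_mem x (r + 1) v (ps.getElem_mem hm)
  have hql : q < x.length := by omega
  -- sorted split around index ps.length - kn
  have hsplit : ps = ps.take (ps.length - kn) ++ ps[ps.length - kn] :: ps.drop (ps.length - kn + 1) := by
    conv_lhs => rw [← List.take_append_drop (ps.length - kn) ps]
    rw [List.drop_eq_getElem_cons hm]
  have hpw := pvOccs_sorted x (r + 1) v
  rw [← hps, hsplit, List.pairwise_append] at hpw
  obtain ⟨_, hpw2, hcross⟩ := hpw
  rw [List.pairwise_cons] at hpw2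
  -- count of elements > q is kn - 1
  have h1 : (ps.take (ps.length - kn)).countP (fun z => decide ((q : Int) < z)) = 0 := by
    rw [List.countP_eq_zero]
    intro z hz
    have := hcross z hz ps[ps.length - kn] (List.mem_cons_self ..)
    rw [hqz] at this
    simp only [decide_eq_true_iff]
    omega
  have h2 : (ps.drop (ps.length - kn + 1)).countP (fun z => decide ((q : Int) < z)) = kn - 1 := by
    rw [List.countP_eq_length.mpr ?_]
    · rw [List.length_drop]
      omega
    · intro z hz
      have := hpw2.1 z hz
      rw [hqz] at this
      simp only [decide_eq_true_iff]
      omega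
  have hcnt_gt : ps.countP (fun z => decide ((q : Int) < z)) = kn - 1 := by
    conv_lhs => rw [hsplit]
    rw [List.countP_append, List.countP_cons, h1, h2, hqz]
    simp only [decide_eq_true_iff]
    rw [if_neg (by omega)]
    omega
  -- translate to prefix counts at l = q + 1
  have hc := pvOccs_countP x v (r + 1) (by omega) (q + 1) (by omega)
  have hcong : ps.countP (fun z => decide (((q + 1 : Nat) : Int) ≤ z))
      = ps.countP (fun z => decide ((q : Int) < z)) := by
    apply List.countP_congr
    intro z _
    have : (((q + 1 : Nat) : Int) ≤ z) ↔ ((q : Int) < z) := by push_cast; omega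
    simp [this]
  rw [← hps, hcong, hcnt_gt] at hc
  have hP1 : pvPfx x (r + 1) v - pvPfx x (q + 1) v = (kn : Int) - 1 := by
    rw [← hc]
    push_cast [Nat.cast_sub hk1]
    ring
  have hocc : pvPfx x (q + 1) v = pvPfx x q v + 1 := by
    rw [pvPfx_succ x hql v, if_pos hqv]
  refine ⟨q, by rw [hget, hqz], by omega, ?_⟩
  intro l
  constructor
  · intro h
    by_contra hlq
    push_neg at hlq
    have := pvPfx_mono x (show l ≤ q by omega) v
    omega
  · intro h
    have := pvPfx_mono x (show q + 1 ≤ l by omega) v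
    omega

-- counting bad left endpoints for right endpoint r from the characterisation by lo
theorem pvBadR_eq (x : List Int) (k : Int) (hk : 1 ≤ k) (r : Nat) (lo : Nat)
    (hlo : lo ≤ r + 1)
    (hchar : ∀ l : Nat, l ≤ r + 1 → ((∀ v, pvPfx x (r + 1) v - pvPfx x l v < k) ↔ lo ≤ l)) :
    ((pvBadR x k r : Nat) : Int) = (r : Int) + 1 - (lo : Int) := by
  unfold pvBadR
  have hcong : ∀ l ∈ List.range (r + 1),
      (pvBadB x k l (r + 1)) = (decide (lo ≤ l) && decide (l < r + 1)) := by
    intro l hl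
    have hlr : l < r + 1 := List.mem_range.mp hl
    by_cases hll : lo ≤ l
    · simp only [decide_eq_true hll, decide_eq_true hlr, Bool.and_self]
      exact (pvBadB_iff_forall x k hk (by omega)).mpr ((hchar l (by omega)).mpr hll)
    · cases hbb : pvBadB x k l (r + 1) with
      | false => simp [hll]
      | true =>
        exact absurd ((hchar l (by omega)).mp
          ((pvBadB_iff_forall x k hk (by omega)).mp hbb)) hll
  rw [List.countP_congr (fun l hl => by rw [hcong l hl]), pvCount_interval lo (r + 1) (r + 1)]
  push_cast [Nat.cast_sub hlo]
  omega

-- evaluating B's fold over range r, for k ≥ 1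
theorem pvB_loop (x : List Int) (k : Int) (N : Nat) (hlen : N ≤ x.length) (hk : 1 ≤ k) :
    ∀ r : Nat, r ≤ N →
    ∃ (lo : Nat) (occ : PySem.Dict Int (List Int)),
      (pvIR r).foldl (pvStepB x k) (0, 0, PySem.Dict.empty)
        = ((((List.range r).map (pvBadR x k)).sum : Int), (lo : Int), occ) ∧
      lo ≤ r ∧ (∀ v, occ.getD v [] = pvOccs x r v) ∧
      (∀ l : Nat, l ≤ r → ((∀ v, pvPfx x r v - pvPfx x l v < k) ↔ lo ≤ l)) := by
  intro r
  induction r with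
  | zero =>
    intro _
    refine ⟨0, PySem.Dict.empty, ?_, le_refl _, ?_, ?_⟩
    · simp [pvIR]
    · intro v; simp [PySem.Dict.getD_empty, pvOccs]
    · intro l hl
      have : l = 0 := by omega
      subst this
      constructor
      · intro _; omega
      · intro _ v; simp [pvPfx_zero]; omega
  | succ r ih =>
    intro hr1
    obtain ⟨lo, occ, heq, hlor, hocc, hchar⟩ := ih (by omega)
    have hrN : r < N := by omega
    have hrl : r < x.length := by omega
    rw [pvIR_succ, List.foldl_append, heq]
    simp only [List.foldl_cons, List.foldl_nil]
    set xr := x.getD r 0 with hxr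
    have hps : occ.getD (PySem.List.pyGetD x ((r : Nat) : Int) 0) [] ++ [((r : Nat) : Int)]
        = pvOccs x (r + 1) xr := by
      rw [PySem.List.pyGetD_natCast x r 0, ← hxr, hocc xr, pvOccs_succ, if_pos rfl]
    have hocc' : ∀ v,
        (occ.insert (PySem.List.pyGetD x ((r : Nat) : Int) 0)
          (occ.getD (PySem.List.pyGetD x ((r : Nat) : Int) 0) [] ++ [((r : Nat) : Int)])).getD v []
        = pvOccs x (r + 1) v := by
      intro v
      rw [PySem.List.pyGetD_natCast x r 0, ← hxr, PySem.Dict.getD_insert]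
      by_cases hv : v = xr
      · rw [if_pos hv, hv]
        rw [PySem.List.pyGetD_natCast x r 0, ← hxr] at hps
        exact hps
      · rw [if_neg hv, hocc v, pvOccs_succ, if_neg (fun h => hv h.symm)]
    have hlenps : ((pvOccs x (r + 1) xr).length : Int) = pvPfx x (r + 1) xr :=
      pvOccs_len x (r + 1) (by omega) xr
    by_cases hcond : k ≤ ((occ.getD (PySem.List.pyGetD x ((r : Nat) : Int) 0) []
        ++ [((r : Nat) : Int)]).length : Int)
    · -- len(ps) ≥ k: lo' = max lo (ps[-k] + 1)
      have hknk : k = ((k.toNat : Nat) : Int) := by omega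
      have hknlen : k.toNat ≤ (pvOccs x (r + 1) xr).length := by
        rw [hps] at hcond
        omega
      obtain ⟨q, hq, hqr, hqiff⟩ :=
        pvKth x r hrl xr k.toNat (by omega) hknlen
      have hchar' : ∀ l : Nat, l ≤ r + 1 →
          ((∀ v, pvPfx x (r + 1) v - pvPfx x l v < k) ↔ max lo (q + 1) ≤ l) := by
        intro l hl
        constructor
        · intro h
          have hq1 : q + 1 ≤ l := by
            have := (hqiff l).mp (by rw [← hknk]; exact h xr)
            omega
          by_cases hlr : l ≤ r
          · have hlo2 : lo ≤ l := (hchar l hlr).mp (fun v => by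
              have := pvPfx_mono x (show r ≤ r + 1 by omega) v
              have := h v
              omega)
            omega
          · omega
        · intro h v
          by_cases hv : v = xr
          · subst hv
            rw [hknk]
            exact (hqiff l).mpr (by omega)
          · have hstep : pvPfx x (r + 1) v = pvPfx x r v := by
              rw [pvPfx_succ x hrl v, if_neg (fun hh => hv hh.symm)]
              ring
            by_cases hlr : l ≤ r
            · rw [hstep]
              exact (hchar l hlr).mpr (by omega) v
            · have : l = r + 1 := by omega
              subst this
              rw [hstep]
              have := pvPfx_mono x (show r ≤ r + 1 by omega) v
              omega
      have hbr : ((pvBadR x k r : Nat) : Int) = (r : Int) + 1 - ((max lo (q + 1) : Nat) : Int) :=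
        pvBadR_eq x k hk r (max lo (q + 1)) (by omega) hchar'
      have hq' : PySem.List.pyGetD (pvOccs x (r + 1) xr) (-k) 0 = (q : Int) := by
        rw [hknk]; exact hq
      refine ⟨max lo (q + 1), _, ?_, by omega, hocc', hchar'⟩
      simp only [pvStepB, if_pos hcond]
      rw [Prod.mk.injEq, Prod.mk.injEq]
      refine ⟨?_, ?_, rfl⟩
      · rw [List.range_succ, List.map_append, List.sum_append, hps, hq']
        simp only [List.map_cons, List.map_nil, List.sum_cons, List.sum_nil]
        have hbr' := hbr
        push_cast at hbr' ⊢
        omega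
      · rw [hps, hq']
        push_cast
        omega
    · -- len(ps) < k: lo' = lo
      have hcnt_small : pvPfx x (r + 1) xr < k := by
        rw [hps] at hcond
        omega
      have hchar' : ∀ l : Nat, l ≤ r + 1 →
          ((∀ v, pvPfx x (r + 1) v - pvPfx x l v < k) ↔ lo ≤ l) := by
        intro l hl
        constructor
        · intro h
          by_cases hlr : l ≤ r
          · exact (hchar l hlr).mp (fun v => by
              have := pvPfx_mono x (show r ≤ r + 1 by omega) v
              have := h v
              omega)
          · omega
        · intro h v
          by_cases hv : v = xr
          · subst hv
            have := pvPfx_nonneg x l xr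
            omega
          · have hstep : pvPfx x (r + 1) v = pvPfx x r v := by
              rw [pvPfx_succ x hrl v, if_neg (fun hh => hv hh.symm)]
              ring
            by_cases hlr : l ≤ r
            · rw [hstep]
              exact (hchar l hlr).mpr h v
            · have : l = r + 1 := by omega
              subst this
              rw [hstep]
              have := pvPfx_mono x (show r ≤ r + 1 by omega) v
              omega
      have hbr : ((pvBadR x k r : Nat) : Int) = (r : Int) + 1 - (lo : Int) :=
        pvBadR_eq x k hk r lo (by omega) hchar'
      refine ⟨lo, _, ?_, by omega, hocc', hchar'⟩
      simp only [pvStepB, if_neg hcond]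
      rw [Prod.mk.injEq, Prod.mk.injEq]
      refine ⟨?_, rfl, rfl⟩
      rw [List.range_succ, List.map_append, List.sum_append]
      simp only [List.map_cons, List.map_nil, List.sum_cons, List.sum_nil]
      have hbr' := hbr
      push_cast at hbr' ⊢
      omega

theorem pvB_eval (x : List Int) (k n : Int) (hk : 1 ≤ k) (h0 : 0 ≤ n)
    (hlen : n ≤ (x.length : Int)) :
    find_non_mod_subarrays_alt n k x = PySem.Int.floordiv (n * (n + 1)) 2
      - (((List.range n.toNat).map (pvBadR x k)).sum : Int) := by
  obtain ⟨lo, occ, heq, _, _, _⟩ :=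
    pvB_loop x k n.toNat (by omega) hk n.toNat (le_refl _)
  unfold find_non_mod_subarrays_alt
  rw [if_neg (by omega)]
  simp only [pvIR_pyRange, heq]

-- ===== the k ≤ 0 region =====

theorem pvB_low_eval (x : List Int) (k n : Int) (hk : k ≤ 0) :
    find_non_mod_subarrays_alt n k x = PySem.Int.floordiv (n * (n + 1)) 2 := by
  unfold find_non_mod_subarrays_alt
  rw [if_pos hk]

-- A's inner loop for k ≤ 0 never reaches position i
theorem pvAWhile_low (x : List Int) (k n : Int) (hk : k ≤ 0) (N : Nat) (hlen : N ≤ x.length)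
    (i : Nat) (hi : i ≤ N) :
    ∀ (fuel : Nat) (j : Nat) (cnt : PySem.Dict Int Int), j ≤ i - 1 →
    (∀ v, cnt.getD v 0 = pvPfx x j v - pvPfx x i v) →
    ∃ (j' : Nat) (cnt' : PySem.Dict Int Int),
      pvAWhile x k n fuel (j : Int) cnt = ((j' : Int), cnt') ∧ j' ≤ i - 1 ∧
      (∀ v, cnt'.getD v 0 = pvPfx x j' v - pvPfx x i v) := by
  intro fuel
  induction fuel with
  | zero =>
    intro j cnt hj hcnt
    exact ⟨j, cnt, rfl, hj, hcnt⟩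
  | succ fuel ih =>
    intro j cnt hj hcnt
    by_cases hcond : ((j : Int) < n ∧ cnt.getD (PySem.List.pyGetD x (j : Int) 0) 0 + 1 < k)
    · have hcnd2 := hcond.2
      rw [PySem.List.pyGetD_natCast x j 0, hcnt] at hcnd2
      have hjip : j < i - 1 := by
        by_contra hge
        have hj' : j = i - 1 := by omega
        rcases Nat.eq_zero_or_pos i with hi0 | hip
        · -- i = 0, so j = 0 and the stored count of x[0] is 0; 1 < k ≤ 0 is absurd
          have hj0 : j = 0 := by omega
          rw [hj0, hi0] at hcnd2
          simp only [pvPfx_zero] at hcnd2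
          omega
        · -- i ≥ 1, j = i - 1: stored count of x[i-1] is -1; 0 < k ≤ 0 is absurd
          have hipl : i - 1 < x.length := by omega
          have hs := pvPfx_succ x hipl (x.getD (i - 1) 0)
          rw [if_pos rfl] at hs
          have hip1 : i - 1 + 1 = i := by omega
          rw [hip1] at hs
          rw [hj'] at hcnd2
          omega
      have hjl : j < x.length := by omega
      have hstep : pvAWhile x k n (fuel + 1) (j : Int) cnt =
          pvAWhile x k n fuel ((j : Int) + 1)
            (cnt.insert (PySem.List.pyGetD x (j : Int) 0)
              (cnt.getD (PySem.List.pyGetD x (j : Int) 0) 0 + 1)) := by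
        rw [pvAWhile, if_pos hcond]
      have hcast : ((j : Int) + 1) = ((j + 1 : Nat) : Int) := by push_cast; ring
      have hcnt' : ∀ v, (cnt.insert (PySem.List.pyGetD x (j : Int) 0)
            (cnt.getD (PySem.List.pyGetD x (j : Int) 0) 0 + 1)).getD v 0
          = pvPfx x (j + 1) v - pvPfx x i v := by
        intro v
        rw [PySem.List.pyGetD_natCast x j 0, PySem.Dict.getD_insert, pvPfx_succ x hjl v]
        by_cases hv : v = x.getD j 0
        · subst hv
          rw [if_pos rfl, if_pos rfl, hcnt]
          ring
        · rw [if_neg hv, if_neg (fun h => hv h.symm), hcnt]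
          ring
      obtain ⟨j', cnt', heq, h1, h2⟩ := ih (j + 1) _ (by omega) hcnt'
      rw [hcast] at hstep
      exact ⟨j', cnt', hstep.trans heq, h1, h2⟩
    · rw [pvAWhile, if_neg hcond]
      exact ⟨j, cnt, rfl, hj, hcnt⟩

-- A for k ≤ 0 gains at least 1 per iteration after the first
theorem pvA_low_loop (x : List Int) (k n : Int) (hk : k ≤ 0) (N : Nat) (hn : n = (N : Int))
    (hlen : N ≤ x.length) :
    ∀ i : Nat, i ≤ N →
    ∃ (ans : Int) (j : Nat) (cnt : PySem.Dict Int Int),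
      (pvIR i).foldl (pvStepA x k n)
          (PySem.Int.floordiv (n * (n + 1)) 2, 0, PySem.Dict.empty)
        = (ans, (j : Int), cnt) ∧
      j ≤ i - 1 ∧ (∀ v, cnt.getD v 0 = pvPfx x j v - pvPfx x i v) ∧
      PySem.Int.floordiv (n * (n + 1)) 2 + (i : Int) - 1 ≤ ans ∧
      (i ≤ 1 → ans = PySem.Int.floordiv (n * (n + 1)) 2) := by
  intro i
  induction i with
  | zero =>
    intro _
    refine ⟨_, 0, PySem.Dict.empty, by simp [pvIR], by omega, ?_, by push_cast; omega, fun _ => rfl⟩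
    intro v; simp [PySem.Dict.getD_empty, pvPfx_zero]
  | succ i ih =>
    intro hi1
    obtain ⟨ans, j, cnt, heq, hj, hcnt, hans, hans0⟩ := ih (by omega)
    obtain ⟨j', cnt', hrun, hj', hcnt'⟩ :=
      pvAWhile_low x k n hk N hlen i (by omega) ((n - (j : Int)).toNat) j cnt hj hcnt
    rw [pvIR_succ, List.foldl_append, heq]
    have hil : i < x.length := by omega
    have hstep : pvStepA x k n (ans, (j : Int), cnt) (i : Int)
        = (ans - ((j' : Int) - (i : Int)), (j' : Int),
           cnt'.insert (x.getD i 0) (cnt'.getD (x.getD i 0) 0 - 1)) := by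
      simp only [pvStepA, hrun, PySem.List.pyGetD_natCast]
    simp only [List.foldl_cons, List.foldl_nil, hstep]
    refine ⟨_, j', _, rfl, by omega, ?_, ?_, ?_⟩
    · intro v
      rw [PySem.Dict.getD_insert, pvPfx_succ x hil v]
      by_cases hv : v = x.getD i 0
      · subst hv
        rw [if_pos rfl, if_pos rfl, hcnt']
        ring
      · rw [if_neg hv, if_neg (fun h => hv h.symm), hcnt']
        ring
    · rcases Nat.eq_zero_or_pos i with hi0 | hip
      · subst hi0
        have hj0 : j' = 0 := by omega
        rw [hans0 (by omega), hj0]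
        push_cast
        omega
      · have hj1 : j' + 1 ≤ i := by omega
        push_cast
        omega
    · intro hle
      have hi0 : i = 0 := by omega
      subst hi0
      have hj0 : j' = 0 := by omega
      rw [hans0 (by omega), hj0]
      push_cast
      ring

theorem pvA_low_eval (x : List Int) (k n : Int) (hk : k ≤ 0) (h2 : 2 ≤ n)
    (hlen : n ≤ (x.length : Int)) :
    PySem.Int.floordiv (n * (n + 1)) 2 + n - 1 ≤ find_non_mod_subarrays n k x := by
  have hn : n = ((n.toNat : Nat) : Int) := by omega
  obtain ⟨ans, j, cnt, heq, _, _, hans, _⟩ :=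
    pvA_low_loop x k n hk n.toNat hn (by omega) n.toNat (le_refl _)
  unfold find_non_mod_subarrays
  simp only [pvIR_pyRange, heq]
  rw [← hn] at hans
  exact hans

-- A for n = 1 and k ≤ 0: the single iteration subtracts nothing
theorem pvA_one (x : List Int) (k : Int) (hk : k ≤ 0) (hlen : (1 : Int) ≤ (x.length : Int)) :
    find_non_mod_subarrays 1 k x = 1 := by
  obtain ⟨ans, j, cnt, heq, _, _, _, hone⟩ :=
    pvA_low_loop x k 1 hk 1 (by norm_num) (by omega) 1 (le_refl _)
  unfold find_non_mod_subarrays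
  simp only [pvIR_pyRange, show ((1 : Int).toNat) = 1 from rfl, heq]
  rw [hone (le_refl _)]
  decide

-- ===== VERDICT (by name: the statement is the Claim_ definition above) =====
theorem find_non_mod_subarrays_spec : Claim_unchanged_find_non_mod_subarrays := by
  intro n k x hdom hpre hnd
  unfold Pre_find_non_mod_subarrays at hpre
  unfold D_find_non_mod_subarrays at hnd
  by_cases hk : 1 ≤ k
  · by_cases hn0 : n ≤ 0
    · rw [pvA_trivial x k n hn0, pvB_trivial x k n hn0]
    · rw [pvA_eval x k n hk (by omega) hpre, pvB_eval x k n hk (by omega) hpre,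
        pvSwap x k n.toNat]
  · have hk0 : k ≤ 0 := by omega
    have hn1 : n ≤ 1 := by
      by_contra hn2
      exact hnd ⟨by omega, hk0⟩
    by_cases hn0 : n ≤ 0
    · rw [pvA_trivial x k n hn0, pvB_trivial x k n hn0]
    · have hn : n = 1 := by omega
      subst hn
      rw [pvA_one x k hk0 hpre, pvB_low_eval x k 1 hk0]
      decide

theorem find_non_mod_subarrays_changed : Claim_changed_find_non_mod_subarrays := by
  unfold Claim_changed_find_non_mod_subarrays; decide

theorem find_non_mod_subarrays_tight : Claim_exact_find_non_mod_subarrays := by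
  intro n k x hdom hpre hd
  unfold Pre_find_non_mod_subarrays at hpre
  unfold D_find_non_mod_subarrays at hd
  obtain ⟨hn2, hk0⟩ := hd
  have hA := pvA_low_eval x k n hk0 hn2 hpre
  rw [pvB_low_eval x k n hk0]
  omega
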